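-- pv_equiv track=rewrite | github.com/Manav-Guha/mycode | src/mycode/js_ingester.py | _compute_brace_depths
-- ===== SOURCE A (Python) =====
-- def _compute_brace_depths(lines: list[str]) -> list[int]:
--     """Compute brace nesting depth at the start of each line."""
--     depths: list[int] = []
--     depth = 0
--     for line in lines:
--         depths.append(depth)
--         for ch in line:
--             if ch == "{":
--                 depth += 1
--             elif ch == "}":
--                 depth -= 1
--     return depths
-- ===== SOURCE B (Python) =====
-- import itertools
--
-- def _compute_brace_depths(lines: list[str]) -> list[int]:
--     """Per-line net brace deltas, then exclusive prefix sums."""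
--     deltas = [line.count("{") - line.count("}") for line in lines]
--     return list(itertools.accumulate(deltas, initial=0))[:-1]
-- ===== Notes on version B (the rewrite author's own statement) =====
-- stated objective: alternative
-- what changed: Replaces the fused per-character scan with two separate passes: a delta table (per-line brace counts via str.count) followed by an exclusive prefix sum via itertools.accumulate.
import Mathlib
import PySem

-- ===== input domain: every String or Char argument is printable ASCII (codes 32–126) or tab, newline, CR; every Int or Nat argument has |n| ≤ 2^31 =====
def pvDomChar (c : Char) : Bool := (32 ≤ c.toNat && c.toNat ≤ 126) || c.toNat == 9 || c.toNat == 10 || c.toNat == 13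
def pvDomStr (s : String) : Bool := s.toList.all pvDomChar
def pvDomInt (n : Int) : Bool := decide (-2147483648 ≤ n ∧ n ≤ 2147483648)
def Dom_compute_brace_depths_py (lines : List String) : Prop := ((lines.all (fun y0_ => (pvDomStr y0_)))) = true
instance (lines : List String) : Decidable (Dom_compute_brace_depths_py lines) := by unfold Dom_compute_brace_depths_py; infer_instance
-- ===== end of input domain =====

-- B replaces A's fused per-character scan with a per-line delta table followed by an exclusive prefix sum; same cost, different decomposition.

-- ===== PORT A =====
-- inner 'for ch in line' body of A
def pvAChar (depth : Int) (ch : Char) : Int :=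
  if ch = '{' then depth + 1 else if ch = '}' then depth - 1 else depth

def compute_brace_depths_py (lines : List String) : List Int :=
  (lines.foldl (fun (st : List Int × Int) line =>
      (st.1 ++ [st.2], line.toList.foldl pvAChar st.2)) ([], 0)).1

-- ===== PORT B =====
-- delta of one line: line.count('{') - line.count('}')
def pvLineDelta (line : String) : Int :=
  (PySem.Str.count line "{" : Int) - (PySem.Str.count line "}" : Int)

-- itertools.accumulate(deltas, initial=0) is List.scanl (+) 0; [:-1] is dropLast
def compute_brace_depths_py_alt (lines : List String) : List Int :=
  (((lines.map pvLineDelta).scanl (· + ·) 0)).dropLast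

-- ===== PRECONDITION & SPEC =====
def Spec_compute_brace_depths_py (lines : List String) (out : List Int) : Prop := out = compute_brace_depths_py_alt lines
instance (lines : List String) (out : List Int) : Decidable (Spec_compute_brace_depths_py lines out) := by unfold Spec_compute_brace_depths_py; infer_instance

-- ===== CLAIM (what is proved, stated in full; the proofs are below) =====
def Claim_equal_compute_brace_depths_py : Prop := ∀ (lines : List String), Dom_compute_brace_depths_py lines → Spec_compute_brace_depths_py lines (compute_brace_depths_py lines)

-- ===== LEMMAS AND PROOFS =====

lemma pv_count_go_single (c : Char) : ∀ (fuel : Nat) (l : List Char) (acc : Nat),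
    l.length ≤ fuel → PySem.Chars.count.go [c] fuel l acc = acc + l.count c := by
  intro fuel
  induction fuel with
  | zero => intro l acc h; cases l with
    | nil => simp [PySem.Chars.count.go]
    | cons a t => simp at h
  | succ n ih =>
    intro l acc h
    cases l with
    | nil => simp [PySem.Chars.count.go]
    | cons a t =>
      simp only [List.length_cons, Nat.succ_le_succ_iff] at h
      by_cases hc : a = c
      · subst hc
        have : [a].isPrefixOf (a :: t) = true := by simp [List.isPrefixOf]
        simp [PySem.Chars.count.go, this, ih t (acc+1) h]
        omega
      · have : [c].isPrefixOf (a :: t) = false := by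
          simp [List.isPrefixOf]; exact fun h' => hc h'.symm
        simp [PySem.Chars.count.go, this, ih t acc h, hc]

lemma pv_str_count_open (s : String) :
    PySem.Str.count s "{" = s.toList.count '{' := by
  rw [PySem.Str.count]
  have h : ("{" : String).toList = ['{'] := rfl
  rw [h, PySem.Chars.count]
  simp only [List.isEmpty]
  rw [pv_count_go_single '{' s.toList.length s.toList 0 le_rfl]
  simp

lemma pv_str_count_close (s : String) :
    PySem.Str.count s "}" = s.toList.count '}' := by
  rw [PySem.Str.count]
  have h : ("}" : String).toList = ['}'] := rfl
  rw [h, PySem.Chars.count]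
  simp only [List.isEmpty]
  rw [pv_count_go_single '}' s.toList.length s.toList 0 le_rfl]
  simp

lemma pv_char_fold (l : List Char) : ∀ (d : Int),
    l.foldl pvAChar d = d + ((l.count '{' : Int) - (l.count '}' : Int)) := by
  induction l with
  | nil => intro d; simp
  | cons a t ih =>
    intro d
    simp only [List.foldl_cons, ih, pvAChar, List.count_cons]
    split_ifs with h1 h2 <;> simp_all <;> ring

lemma pv_line_fold (line : String) (d : Int) :
    line.toList.foldl pvAChar d = d + pvLineDelta line := by
  rw [pv_char_fold, pvLineDelta, pv_str_count_open, pv_str_count_close]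

lemma pv_scanl_ne_nil (f : Int → Int → Int) (d : Int) (l : List Int) :
    l.scanl f d ≠ [] := by cases l <;> simp [List.scanl]

lemma pv_main (lines : List String) : ∀ (acc : List Int) (d : Int),
    (lines.foldl (fun (st : List Int × Int) line =>
        (st.1 ++ [st.2], line.toList.foldl pvAChar st.2)) (acc, d)).1
      = acc ++ ((lines.map pvLineDelta).scanl (· + ·) d).dropLast := by
  induction lines with
  | nil => intro acc d; simp
  | cons l t ih =>
    intro acc d
    simp only [List.foldl_cons, List.map_cons, List.scanl_cons]
    rw [ih, pv_line_fold]
    rw [List.dropLast_cons_of_ne_nil (pv_scanl_ne_nil _ _ _)]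
    simp

-- ===== VERDICT (by name: the statement is the Claim_ definition above) =====
theorem compute_brace_depths_py_spec : Claim_equal_compute_brace_depths_py := by
  intro lines _
  unfold Spec_compute_brace_depths_py compute_brace_depths_py compute_brace_depths_py_alt
  rw [pv_main]
  simp
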